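-- pv_equiv track=rewrite | github.com/Raneemoqaily7/codewars | codewars/strings.py | find_elements_with_no_greater_right
-- ===== SOURCE A (Python) =====
-- def find_elements_with_no_greater_right(arr):
--     res=[]
--     max = float("-inf")
--     for i in range(len(arr) -1 ,-1 ,-1):
--         if arr[i]>max:
--             res.append(arr[i])
--             max =arr[i]
--     res.reverse()
--     return res
-- ===== SOURCE B (Python) =====
-- def find_elements_with_no_greater_right(arr):
--     # suffix_max[i] = max of arr[i+1:], or None past the end
--     suffix_max = []
--     m = None
--     for x in reversed(arr):
--         suffix_max.append(m)
--         if m is None or x > m: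
--             m = x
--     suffix_max.reverse()
--     return [x for x, s in zip(arr, suffix_max) if s is None or x > s]
-- ===== Notes on version B (the rewrite author's own statement) =====
-- stated objective: alternative
-- what changed: B precomputes a suffix-maximum table in one right-to-left pass, then a separate left-to-right pass keeps arr[i] when it strictly exceeds its suffix max, producing the result directly in order with no final reverse; A interleaves selection with a running max while iterating backwards and reverses at the end.
import Mathlib
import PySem

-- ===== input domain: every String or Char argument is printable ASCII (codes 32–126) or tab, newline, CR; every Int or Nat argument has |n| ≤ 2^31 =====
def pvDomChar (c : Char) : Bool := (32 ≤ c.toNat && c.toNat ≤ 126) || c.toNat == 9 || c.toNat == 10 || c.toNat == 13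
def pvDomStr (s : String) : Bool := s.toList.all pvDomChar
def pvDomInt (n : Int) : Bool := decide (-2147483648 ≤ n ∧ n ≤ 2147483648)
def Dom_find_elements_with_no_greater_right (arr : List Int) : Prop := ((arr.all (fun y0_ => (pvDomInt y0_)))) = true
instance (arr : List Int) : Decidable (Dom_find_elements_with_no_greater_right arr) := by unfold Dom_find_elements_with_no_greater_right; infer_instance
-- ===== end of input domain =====

-- B re-implements via a precomputed suffix-maximum table + a forward selection pass (alternative decomposition, same cost).

-- ===== PORT A =====
-- Python's float("-inf") running max is Option Int (none = -inf); arr[i] with i always in range is pyGetD (exact here).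
def find_elements_with_no_greater_right (arr : List Int) : List Int :=
  let st :=
    (PySem.List.pyRange ((PySem.List.len arr) - 1) (-1) (-1)).foldl
      (fun (st : List Int × Option Int) i =>
        let x := PySem.List.pyGetD arr i 0
        if (match st.2 with | none => true | some m => decide (x > m)) then
          (st.1 ++ [x], some x)
        else st)
      ([], none)
  st.1.reverse

-- ===== PORT B =====
-- Source B's first loop: over reversed(arr), append old m to suffix_max, update m; then reverse the table.
def pvSuffixMax (arr : List Int) : List (Option Int) :=
  ((arr.reverse.foldl
      (fun (st : List (Option Int) × Option Int) x =>
        (st.1 ++ [st.2],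
         match st.2 with | none => some x | some m => if x > m then some x else some m))
      ([], none)).1).reverse

-- Source B's comprehension: keep x when its suffix max is None or x strictly exceeds it.
def find_elements_with_no_greater_right_alt (arr : List Int) : List Int :=
  (arr.zip (pvSuffixMax arr)).filterMap (fun p =>
    match p.2 with
    | none => some p.1
    | some s => if p.1 > s then some p.1 else none)

-- ===== PRECONDITION & SPEC =====
def Spec_find_elements_with_no_greater_right (arr : List Int) (out : List Int) : Prop := out = find_elements_with_no_greater_right_alt arr
instance (arr : List Int) (out : List Int) : Decidable (Spec_find_elements_with_no_greater_right arr out) := by unfold Spec_find_elements_with_no_greater_right; infer_instance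

-- ===== CLAIM (what is proved, stated in full; the proofs are below) =====
def Claim_equal_find_elements_with_no_greater_right : Prop := ∀ (arr : List Int), Dom_find_elements_with_no_greater_right arr → Spec_find_elements_with_no_greater_right arr (find_elements_with_no_greater_right arr)

-- ===== LEMMAS AND PROOFS =====

-- running maximum of a list as an Option (none = -inf), by structural recursion
def pvMsx : List Int → Option Int
  | [] => none
  | x :: xs => match pvMsx xs with
      | none => some x
      | some m => if x > m then some x else some m

theorem pvFoldB_snd (xs : List Int) :
    ((xs.reverse.foldl
      (fun (st : List (Option Int) × Option Int) x =>
        (st.1 ++ [st.2],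
         match st.2 with | none => some x | some m => if x > m then some x else some m))
      ([], none)).2) = pvMsx xs := by
  induction xs with
  | nil => rfl
  | cons y ys ih =>
      simp only [List.reverse_cons, List.foldl_append, List.foldl_cons, List.foldl_nil, pvMsx, ih]

theorem pvSuffixMax_cons (x : Int) (xs : List Int) :
    pvSuffixMax (x :: xs) = pvMsx xs :: pvSuffixMax xs := by
  unfold pvSuffixMax
  simp only [List.reverse_cons, List.foldl_append, List.foldl_cons, List.foldl_nil]
  show ((_ : List (Option Int) × Option Int).1 ++ [_]).reverse = _
  rw [List.reverse_append, pvFoldB_snd]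
  rfl

theorem pvAlt_cons (x : Int) (xs : List Int) :
    find_elements_with_no_greater_right_alt (x :: xs) =
      (if (match pvMsx xs with | none => true | some m => decide (x > m)) then
        x :: find_elements_with_no_greater_right_alt xs
      else find_elements_with_no_greater_right_alt xs) := by
  unfold find_elements_with_no_greater_right_alt
  rw [pvSuffixMax_cons, List.zip_cons_cons, List.filterMap_cons]
  cases h : pvMsx xs with
  | none => simp
  | some m => by_cases hx : x > m <;> simp [hx]

theorem pvFoldA (xs : List Int) :
    (xs.reverse.foldl
      (fun (st : List Int × Option Int) x =>
        if (match st.2 with | none => true | some m => decide (x > m)) then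
          (st.1 ++ [x], some x)
        else st)
      ([], none)) = ((find_elements_with_no_greater_right_alt xs).reverse, pvMsx xs) := by
  induction xs with
  | nil => rfl
  | cons y ys ih =>
      simp only [List.reverse_cons, List.foldl_append, List.foldl_cons, List.foldl_nil, ih,
        pvAlt_cons, pvMsx]
      cases h : pvMsx ys with
      | none => simp
      | some m => by_cases hy : y > m <;> simp [hy]

theorem pvA_eq_alt (arr : List Int) :
    find_elements_with_no_greater_right arr = find_elements_with_no_greater_right_alt arr := by
  unfold find_elements_with_no_greater_right
  have hrange : PySem.List.pyRange ((PySem.List.len arr) - 1) (-1) (-1)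
      = (PySem.List.pyRange 0 (PySem.List.len arr) 1).reverse := by
    rw [PySem.List.pyRange_neg_one_eq_reverse]; norm_num
  rw [hrange]
  have hmap : ((PySem.List.pyRange 0 (PySem.List.len arr) 1).map
      (fun i => PySem.List.pyGetD arr i 0)) = arr := PySem.List.map_pyGetD_pyRange_zero arr 0
  have hfold : ∀ (init : List Int × Option Int),
      ((PySem.List.pyRange 0 (PySem.List.len arr) 1).reverse).foldl
        (fun (st : List Int × Option Int) i =>
          let x := PySem.List.pyGetD arr i 0
          if (match st.2 with | none => true | some m => decide (x > m)) then
            (st.1 ++ [x], some x)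
          else st) init
      = arr.reverse.foldl
        (fun (st : List Int × Option Int) x =>
          if (match st.2 with | none => true | some m => decide (x > m)) then
            (st.1 ++ [x], some x)
          else st) init := by
    intro init
    conv_rhs => rw [← hmap, ← List.map_reverse, List.foldl_map]
  rw [hfold, pvFoldA]
  simp

-- ===== VERDICT (by name: the statement is the Claim_ definition above) =====
theorem find_elements_with_no_greater_right_spec : Claim_equal_find_elements_with_no_greater_right := by
  intro arr _
  exact pvA_eq_alt arr
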